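-- pv_equiv track=rewrite | github.com/chcaya/python_docker | ardulog.py | find_closest_timestamps_idx
-- ===== SOURCE A (Python) =====
-- import bisect
--
-- def find_closest_timestamps_idx(_input_timestamps, _timestamps_list):
--     closest_indices = []
--     for timestamp in _input_timestamps:
--         # Find the position where the timestamp would be inserted to keep the list sorted
--         pos = bisect.bisect_left(_timestamps_list, timestamp)
--
--         # Check if the timestamp is exactly matched or find the closest one
--         if pos == 0:
--             closest_indices.append(0)
--         elif pos == len(_timestamps_list):
--             closest_indices.append(len(_timestamps_list) - 1)
--         else:
--             # Compare the difference with the previous and next timestamp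
--             prev_diff = abs(_timestamps_list[pos - 1] - timestamp)
--             next_diff = abs(_timestamps_list[pos] - timestamp)
--             if prev_diff <= next_diff:
--                 closest_indices.append(pos - 1)
--             else:
--                 closest_indices.append(pos)
--
--     return closest_indices
-- ===== SOURCE B (Python) =====
-- def _bisect_left(a, x):
--     if not a:
--         return 0
--     mid = len(a) // 2
--     if a[mid] < x:
--         return mid + 1 + _bisect_left(a[mid + 1:], x)
--     return _bisect_left(a[:mid], x)
--
-- def _closest_idx(lst, t):
--     pos = _bisect_left(lst, t)
--     cands = [i for i in (pos - 1, pos) if 0 <= i < len(lst)]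
--     if not cands:
--         return 0
--     return min(cands, key=lambda i: abs(lst[i] - t))
--
-- def find_closest_timestamps_idx(_input_timestamps, _timestamps_list):
--     return [_closest_idx(_timestamps_list, t) for t in _input_timestamps]
-- ===== Notes on version B (the rewrite author's own statement) =====
-- stated objective: alternative
-- what changed: B replaces the iterative lo/hi bisect_left and the three-way neighbour branch chain by a recursive slice-based bisect (same comparison path, since (lo+hi)//2 = lo+(hi-lo)//2) and a uniform clamped candidate list [pos-1, pos] selected with min(key=|lst[i]-t|), ties to the first; composed as a list comprehension over a helper.
import Mathlib
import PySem

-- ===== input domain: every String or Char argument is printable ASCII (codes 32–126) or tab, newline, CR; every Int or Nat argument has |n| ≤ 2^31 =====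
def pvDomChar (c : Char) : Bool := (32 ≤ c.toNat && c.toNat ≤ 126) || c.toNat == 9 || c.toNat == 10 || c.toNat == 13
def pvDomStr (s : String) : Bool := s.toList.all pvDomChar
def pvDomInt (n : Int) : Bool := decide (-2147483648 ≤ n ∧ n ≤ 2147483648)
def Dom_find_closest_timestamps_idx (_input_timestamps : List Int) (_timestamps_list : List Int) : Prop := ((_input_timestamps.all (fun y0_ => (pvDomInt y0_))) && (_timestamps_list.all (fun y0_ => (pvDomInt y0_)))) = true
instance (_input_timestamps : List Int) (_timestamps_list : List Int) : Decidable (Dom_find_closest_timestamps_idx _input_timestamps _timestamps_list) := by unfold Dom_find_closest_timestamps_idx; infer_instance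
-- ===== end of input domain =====

-- B replaces A's index-interval bisect loop and three-way neighbour branch chain by a recursive
-- slice-based bisect plus a uniform clamped-candidate min(key=|lst[i]-t|) selection (objective: alternative).

-- ===== PORT A =====
-- literal port of Python's bisect.bisect_left(a, x): lo=0, hi=len(a); while lo<hi: …
def bslAux (xs : List Int) (t : Int) (lo hi : Nat) : Nat :=
  if _h : lo < hi then
    let mid := (lo + hi) / 2
    if xs.getD mid 0 < t then bslAux xs t (mid + 1) hi
    else bslAux xs t lo mid
  else lo
termination_by hi - lo
decreasing_by all_goals omega

def find_closest_timestamps_idx (_input_timestamps : List Int) (_timestamps_list : List Int) : List Int :=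
  _input_timestamps.foldl (fun closest_indices timestamp =>
    let pos := bslAux _timestamps_list timestamp 0 _timestamps_list.length
    if pos = 0 then closest_indices ++ [(0 : Int)]
    else if pos = _timestamps_list.length then closest_indices ++ [(_timestamps_list.length : Int) - 1]
    else
      let prev_diff := |_timestamps_list.getD (pos - 1) 0 - timestamp|
      let next_diff := |_timestamps_list.getD pos 0 - timestamp|
      if prev_diff ≤ next_diff then closest_indices ++ [((pos : Int) - 1)]
      else closest_indices ++ [(pos : Int)]) []

-- ===== PORT B =====
-- recursive slice-based bisect_left: empty → 0, else split at len//2 and recurse on a slice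
def bslRec (a : List Int) (x : Int) : Nat :=
  if h : a = [] then 0
  else if a.getD (a.length / 2) 0 < x then
    a.length / 2 + 1 + bslRec (a.drop (a.length / 2 + 1)) x
  else bslRec (a.take (a.length / 2)) x
termination_by a.length
decreasing_by
  all_goals
    have hl : 0 < a.length := List.length_pos_iff.mpr h
    simp [List.length_drop, List.length_take]
    omega

-- per-timestamp: clamped candidates (pos-1, pos), then min by |lst[i] - t| (ties → first)
def closestIdx (lst : List Int) (t : Int) : Int :=
  let pos : Int := (bslRec lst t : Int)
  let cands := [pos - 1, pos].filter (fun i => decide ((0 : Int) ≤ i) && decide (i < (lst.length : Int)))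
  match PySem.List.min? cands (fun i => |PySem.List.pyGetD lst i 0 - t|) with
  | none => 0
  | some m => m

def find_closest_timestamps_idx_alt (_input_timestamps : List Int) (_timestamps_list : List Int) : List Int :=
  _input_timestamps.map (fun timestamp => closestIdx _timestamps_list timestamp)

-- ===== PRECONDITION & SPEC =====
def Spec_find_closest_timestamps_idx (_input_timestamps : List Int) (_timestamps_list : List Int) (out : List Int) : Prop := out = find_closest_timestamps_idx_alt _input_timestamps _timestamps_list
instance (_input_timestamps : List Int) (_timestamps_list : List Int) (out : List Int) : Decidable (Spec_find_closest_timestamps_idx _input_timestamps _timestamps_list out) := by unfold Spec_find_closest_timestamps_idx; infer_instance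

-- ===== CLAIM (what is proved, stated in full; the proofs are below) =====
def Claim_equal_find_closest_timestamps_idx : Prop := ∀ (_input_timestamps : List Int) (_timestamps_list : List Int), Dom_find_closest_timestamps_idx _input_timestamps _timestamps_list → Spec_find_closest_timestamps_idx _input_timestamps _timestamps_list (find_closest_timestamps_idx _input_timestamps _timestamps_list)

-- ===== LEMMAS AND PROOFS =====

-- A's per-timestamp answer, factored out of the branch-local appends
def aOne (lst : List Int) (t : Int) : Int :=
  let pos := bslAux lst t 0 lst.length
  if pos = 0 then 0
  else if pos = lst.length then (lst.length : Int) - 1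
  else if |lst.getD (pos - 1) 0 - t| ≤ |lst.getD pos 0 - t| then ((pos : Int) - 1)
  else (pos : Int)

lemma bslAux_bounds (xs : List Int) (t : Int) :
    ∀ (fuel lo hi : Nat), hi - lo ≤ fuel → lo ≤ hi →
    lo ≤ bslAux xs t lo hi ∧ bslAux xs t lo hi ≤ hi := by
  intro fuel
  induction fuel with
  | zero =>
    intro lo hi hf hlh
    rw [bslAux, dif_neg (by omega : ¬ lo < hi)]
    omega
  | succ m ih =>
    intro lo hi hf hlh
    by_cases h : lo < hi
    · rw [bslAux, dif_pos h]
      simp only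
      by_cases hc : xs.getD ((lo + hi) / 2) 0 < t
      · rw [if_pos hc]
        have := ih ((lo + hi) / 2 + 1) hi (by omega) (by omega)
        omega
      · rw [if_neg hc]
        have := ih lo ((lo + hi) / 2) (by omega) (by omega)
        omega
    · rw [bslAux, dif_neg h]; omega

-- the slice recursion visits exactly the indices the lo/hi loop visits: (lo+hi)/2 = lo + (hi-lo)/2
lemma bslAux_eq_bslRec (xs : List Int) (t : Int) :
    ∀ (fuel lo hi : Nat), hi - lo ≤ fuel → lo ≤ hi → hi ≤ xs.length →
    bslAux xs t lo hi = lo + bslRec ((xs.drop lo).take (hi - lo)) t := by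
  intro fuel
  induction fuel with
  | zero =>
    intro lo hi hf hlh hhn
    have he : lo = hi := by omega
    subst he
    rw [bslAux, dif_neg (by omega : ¬ lo < lo)]
    simp [bslRec]
  | succ m ih =>
    intro lo hi hf hlh hhn
    by_cases h : lo < hi
    · have hlen : ((xs.drop lo).take (hi - lo)).length = hi - lo := by
        simp [List.length_take, List.length_drop]; omega
      have hne : (xs.drop lo).take (hi - lo) ≠ [] := by
        intro hcon; rw [hcon] at hlen; simp at hlen; omega
      have hget : ((xs.drop lo).take (hi - lo)).getD ((hi - lo) / 2) 0
          = xs.getD ((lo + hi) / 2) 0 := by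
        have h1 : (hi - lo) / 2 < ((xs.drop lo).take (hi - lo)).length := by omega
        have h2 : (lo + hi) / 2 < xs.length := by omega
        rw [List.getD_eq_getElem _ _ h1, List.getD_eq_getElem _ _ h2]
        rw [List.getElem_take, List.getElem_drop]
        congr 1; omega
      rw [bslAux, dif_pos h, bslRec, dif_neg hne]
      simp only [hlen]
      rw [hget]
      by_cases hc : xs.getD ((lo + hi) / 2) 0 < t
      · rw [if_pos hc, if_pos hc]
        have hdrop : ((xs.drop lo).take (hi - lo)).drop ((hi - lo) / 2 + 1)
            = (xs.drop ((lo + hi) / 2 + 1)).take (hi - ((lo + hi) / 2 + 1)) := by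
          rw [List.drop_take, List.drop_drop]
          congr 1 <;> first | omega | (congr 1; omega)
        rw [hdrop, ih ((lo + hi) / 2 + 1) hi (by omega) (by omega) hhn]
        omega
      · rw [if_neg hc, if_neg hc]
        have htake : ((xs.drop lo).take (hi - lo)).take ((hi - lo) / 2)
            = (xs.drop lo).take ((lo + hi) / 2 - lo) := by
          rw [List.take_take]
          congr 1; omega
        rw [htake, ih lo ((lo + hi) / 2) (by omega) (by omega) (by omega)]
    · rw [bslAux, dif_neg h]
      have he : lo = hi := by omega
      subst he
      simp [bslRec]

lemma bslRec_full (xs : List Int) (t : Int) :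
    bslRec xs t = bslAux xs t 0 xs.length := by
  rw [bslAux_eq_bslRec xs t xs.length 0 xs.length (by omega) (by omega) (le_refl _)]
  simp

lemma one_eq (lst : List Int) (t : Int) : aOne lst t = closestIdx lst t := by
  obtain ⟨hlo, hhi⟩ := bslAux_bounds lst t lst.length 0 lst.length (by omega) (by omega)
  set pos := bslAux lst t 0 lst.length with hpos
  have hrec : bslRec lst t = pos := bslRec_full lst t
  have hfil2 : ∀ a b : Int,
      ([a, b].filter (fun i => decide ((0 : Int) ≤ i) && decide (i < (lst.length : Int))))
      = (if 0 ≤ a ∧ a < (lst.length : Int) then [a] else [])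
        ++ (if 0 ≤ b ∧ b < (lst.length : Int) then [b] else []) := by
    intro a b
    simp only [List.filter_cons, List.filter_nil, Bool.and_eq_true, decide_eq_true_eq]
    split_ifs <;> simp_all
  have hB : closestIdx lst t =
      (match PySem.List.min?
          (((if 0 ≤ (pos : Int) - 1 ∧ (pos : Int) - 1 < (lst.length : Int) then [(pos : Int) - 1] else [])
            ++ (if 0 ≤ (pos : Int) ∧ (pos : Int) < (lst.length : Int) then [(pos : Int)] else [])))
          (fun i => |PySem.List.pyGetD lst i 0 - t|) with
       | none => 0
       | some m => m) := by
    simp only [closestIdx, hrec, hfil2]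
  rw [hB]
  by_cases h0 : pos = 0
  · have hA : aOne lst t = 0 := by
      simp only [aOne, ← hpos]
      rw [if_pos h0]
    rw [hA, if_neg (by omega)]
    by_cases hn : lst.length = 0
    · rw [if_neg (by omega)]
      simp [PySem.List.min?]
    · rw [if_pos (by omega)]
      simp [PySem.List.min?, h0]
  · have hp0 : 0 < pos := Nat.pos_of_ne_zero h0
    have hn : 0 < lst.length := by omega
    by_cases hl : pos = lst.length
    · have hA : aOne lst t = (lst.length : Int) - 1 := by
        simp only [aOne, ← hpos]
        rw [if_neg h0, if_pos hl]
      rw [hA, if_pos (by omega), if_neg (by omega)]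
      simp only [List.append_nil]
      simp [PySem.List.min?, hl]
    · have hpl : pos < lst.length := lt_of_le_of_ne hhi hl
      rw [if_pos (by omega), if_pos (by omega)]
      have hk1 : PySem.List.pyGetD lst ((pos : Int) - 1) 0 = lst.getD (pos - 1) 0 := by
        have h1 : ((pos : Int) - 1) = ((pos - 1 : Nat) : Int) := by omega
        rw [h1, PySem.List.pyGetD_natCast]
      have hk2 : PySem.List.pyGetD lst (pos : Int) 0 = lst.getD pos 0 := by
        rw [PySem.List.pyGetD_natCast]
      have hA : aOne lst t =
          (if |lst.getD (pos - 1) 0 - t| ≤ |lst.getD pos 0 - t| then ((pos : Int) - 1) else (pos : Int)) := by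
        simp only [aOne, ← hpos]
        rw [if_neg h0, if_neg hl]
      rw [hA]
      simp only [List.cons_append, List.nil_append, PySem.List.min?, List.foldl_cons,
        List.foldl_nil, hk1, hk2]
      split_ifs with h1 h2 h3 <;> first | rfl | omega

lemma portA_eq_map (inp lst : List Int) :
    find_closest_timestamps_idx inp lst = inp.map (aOne lst) := by
  have h : find_closest_timestamps_idx inp lst
      = inp.foldl (fun acc t => acc ++ [aOne lst t]) [] := by
    unfold find_closest_timestamps_idx
    congr 1
    funext acc t
    simp only [aOne]
    split_ifs <;> rfl
  rw [h, PySem.List.foldl_append_singleton_eq_map]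
  simp

-- ===== VERDICT (by name: the statement is the Claim_ definition above) =====
theorem find_closest_timestamps_idx_spec : Claim_equal_find_closest_timestamps_idx := by
  intro inp lst _
  unfold Spec_find_closest_timestamps_idx find_closest_timestamps_idx_alt
  rw [portA_eq_map]
  exact List.map_congr_left (fun t _ => one_eq lst t)
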